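-- pv_equiv track=rewrite | github.com/luigimenna77/cdc | organizer.py | greedy_group_letters
-- ===== SOURCE A (Python) =====
-- from typing import Dict, List, Set, Tuple
--
-- def greedy_group_letters(letters: List[str], conflicts: Dict[str, Set[str]], max_group_size: int = 4) -> List[List[str]]:
--     """Euristica greedy: lettere più “difficili” prima, poi nel primo gruppo compatibile."""
--     letters_sorted = sorted(letters, key=lambda L: len(conflicts[L]), reverse=True)
--     groups: List[List[str]] = []
--     for L in letters_sorted:
--         placed = False
--         for g in groups:
--             if len(g) < max_group_size and all(L not in conflicts[other] for other in g):
--                 g.append(L)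
--                 placed = True
--                 break
--         if not placed:
--             groups.append([L])
--     return groups
-- ===== SOURCE B (Python) =====
-- def greedy_group_letters(letters, conflicts, max_group_size=4):
--     """Color-table formulation with an inverted 'blocked colors' index:
--     placing a letter pushes its group index onto blocked[x] for every x in
--     conflicts[letter], so placement never inspects a group's members at all."""
--     order = sorted(letters, key=lambda L: len(conflicts[L]), reverse=True)
--     groups = []
--     sizes = []
--     blocked = {}               # letter -> set of group indices it may not join
--     for L in order:
--         bad = blocked.get(L, set())
--         c = next((i for i in range(len(sizes))
--                   if sizes[i] < max_group_size and i not in bad), None)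
--         if c is None:
--             c = len(groups)
--             groups.append([])
--             sizes.append(0)
--         groups[c].append(L)
--         sizes[c] += 1
--         for x in conflicts[L]:
--             blocked.setdefault(x, set()).add(c)
--     return groups
-- ===== Notes on version B (the rewrite author's own statement) =====
-- stated objective: alternative
-- what changed: B reformulates the grouping as color assignment with an inverted index: it keeps only a sizes table and a dict mapping each letter to the set of group indices blocked for it (pushed eagerly from conflicts[L] when L is placed), so choosing a group is a scan over indices that never inspects any group's members, instead of A's nested all(...) scan over each candidate group.
import Mathlib
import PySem

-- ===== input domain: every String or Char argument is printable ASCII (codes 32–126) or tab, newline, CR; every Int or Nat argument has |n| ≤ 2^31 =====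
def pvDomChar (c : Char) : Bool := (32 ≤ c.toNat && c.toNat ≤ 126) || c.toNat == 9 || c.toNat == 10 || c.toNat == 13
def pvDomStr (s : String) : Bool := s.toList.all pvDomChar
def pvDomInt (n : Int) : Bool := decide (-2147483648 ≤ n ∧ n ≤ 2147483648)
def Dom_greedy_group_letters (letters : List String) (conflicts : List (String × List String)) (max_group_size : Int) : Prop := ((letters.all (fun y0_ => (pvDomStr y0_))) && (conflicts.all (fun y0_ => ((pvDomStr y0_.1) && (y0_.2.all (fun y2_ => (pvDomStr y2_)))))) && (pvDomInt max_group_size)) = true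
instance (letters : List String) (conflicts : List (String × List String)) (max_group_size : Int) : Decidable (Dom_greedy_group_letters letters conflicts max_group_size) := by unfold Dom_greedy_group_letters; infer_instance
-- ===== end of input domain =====

-- B replaces A's first-fit-over-group-members test by a color table: per-group sizes plus
-- an inverted 'blocked colors' dict (letter -> set of group indices), filled from conflicts[L]
-- when L is placed; return values proved equal on Pre_.

-- ===== PORT A =====
-- A's inner loop over 'groups': first-fit, append L to the first compatible group.
def pvPlaceA (d : PySem.Dict String (List String)) (max_group_size : Int) (L : String) :
    List (List String) → List (List String)
  | [] => [[L]]
  | g :: gs =>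
      if decide (PySem.List.len g < max_group_size)
          && g.all (fun other => !(((d.get? other).getD []).contains L)) then
        (g ++ [L]) :: gs
      else
        g :: pvPlaceA d max_group_size L gs

def greedy_group_letters (letters : List String) (conflicts : List (String × List String)) (max_group_size : Int) : List (List String) :=
  let d := PySem.Dict.ofList conflicts
  let letters_sorted :=
    PySem.List.sorted letters (fun L => PySem.Set.len (PySem.Set.ofList ((d.get? L).getD []))) true
  letters_sorted.foldl (fun groups L => pvPlaceA d max_group_size L groups) []

-- ===== PORT B =====
-- next((i for i in range(len(sizes)) if sizes[i] < max and i not in bad), None):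
-- scan of the sizes table carrying the absolute index i.
def pvFirstFit (m : Int) (bad : PySem.Set Int) : List Int → Nat → Option Nat
  | [], _ => none
  | s :: ss, i =>
      if decide (s < m) && !(PySem.Set.contains bad (Int.ofNat i)) then some i
      else pvFirstFit m bad ss (i + 1)

-- for x in conflicts[L]: blocked.setdefault(x, set()).add(c)
def pvBlockAll (c : Int) (xs : List String) (b : PySem.Dict String (PySem.Set Int)) :
    PySem.Dict String (PySem.Set Int) :=
  xs.foldl (fun b x => b.insert x (PySem.Set.add (b.getD x PySem.Set.empty) c)) b

-- one loop body of B; state = (groups, sizes, blocked). List indexing groups[c]/sizes[c]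
-- is ported with List.getD/List.set (c is always in range here, so this is exact).
def pvStepB (d : PySem.Dict String (List String)) (m : Int)
    (st : List (List String) × List Int × PySem.Dict String (PySem.Set Int)) (L : String) :
    List (List String) × List Int × PySem.Dict String (PySem.Set Int) :=
  let bad := st.2.2.getD L PySem.Set.empty
  let gsc : List (List String) × List Int × Nat :=
    match pvFirstFit m bad st.2.1 0 with
    | some c => (st.1, st.2.1, c)
    | none => (st.1 ++ [[]], st.2.1 ++ [(0 : Int)], st.1.length)
  (gsc.1.set gsc.2.2 (gsc.1.getD gsc.2.2 [] ++ [L]),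
   gsc.2.1.set gsc.2.2 (gsc.2.1.getD gsc.2.2 0 + 1),
   pvBlockAll (Int.ofNat gsc.2.2) ((d.get? L).getD []) st.2.2)

def greedy_group_letters_alt (letters : List String) (conflicts : List (String × List String)) (max_group_size : Int) : List (List String) :=
  let d := PySem.Dict.ofList conflicts
  let order :=
    PySem.List.sorted letters (fun L => PySem.Set.len (PySem.Set.ofList ((d.get? L).getD []))) true
  (order.foldl (fun st L => pvStepB d max_group_size st L) ([], [], PySem.Dict.empty)).1

-- ===== PRECONDITION & SPEC =====
-- Pre_: every letter occurs as a key of conflicts (otherwise Python's conflicts[L] raises KeyError).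
def Pre_greedy_group_letters (letters : List String) (conflicts : List (String × List String)) (max_group_size : Int) : Prop :=
  ∀ L ∈ letters, L ∈ conflicts.map Prod.fst

instance (letters : List String) (conflicts : List (String × List String)) (max_group_size : Int) : Decidable (Pre_greedy_group_letters letters conflicts max_group_size) := by
  unfold Pre_greedy_group_letters; infer_instance

def pvWitness_greedy_group_letters : List String × (List (String × List String)) × Int :=
  (["a", "b", "c"], [("a", ["b"]), ("b", ["a"]), ("c", [])], 2)

def Spec_greedy_group_letters (letters : List String) (conflicts : List (String × List String)) (max_group_size : Int) (out : List (List String)) : Prop := out = greedy_group_letters_alt letters conflicts max_group_size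
instance (letters : List String) (conflicts : List (String × List String)) (max_group_size : Int) (out : List (List String)) : Decidable (Spec_greedy_group_letters letters conflicts max_group_size out) := by unfold Spec_greedy_group_letters; infer_instance

-- ===== CLAIM (what is proved, stated in full; the proofs are below) =====
def Claim_equal_greedy_group_letters : Prop := ∀ (letters : List String) (conflicts : List (String × List String)) (max_group_size : Int), Dom_greedy_group_letters letters conflicts max_group_size → Pre_greedy_group_letters letters conflicts max_group_size → Spec_greedy_group_letters letters conflicts max_group_size (greedy_group_letters letters conflicts max_group_size)

-- ===== LEMMAS AND PROOFS =====

-- blocked-index invariant: blocked[y] holds index i iff some member of group i conflicts with y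
def pvInvB (d : PySem.Dict String (List String)) (b : PySem.Dict String (PySem.Set Int))
    (gs : List (List String)) : Prop :=
  ∀ y (i : Nat), PySem.Set.contains (b.getD y PySem.Set.empty) (Int.ofNat i) = true ↔
    ∃ mm ∈ gs.getD i [], y ∈ (d.get? mm).getD []

theorem pvBlockAll_mem (c : Int) (xs : List String) (b : PySem.Dict String (PySem.Set Int))
    (y : String) (z : Int) :
    PySem.Set.contains ((pvBlockAll c xs b).getD y PySem.Set.empty) z = true ↔
      PySem.Set.contains (b.getD y PySem.Set.empty) z = true ∨ (y ∈ xs ∧ z = c) := by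
  induction xs generalizing b with
  | nil => simp [pvBlockAll]
  | cons x xs ih =>
      simp only [pvBlockAll, List.foldl_cons] at *
      rw [ih]
      by_cases hx : y = x
      · subst hx
        rw [PySem.Dict.getD_insert_self]
        simp only [PySem.Set.contains_iff, PySem.Set.mem_add, List.mem_cons]
        tauto
      · rw [PySem.Dict.getD_insert, if_neg hx]
        simp only [List.mem_cons]
        tauto

-- small list facts this file needs (set/getD at one index)
theorem pv_set_concat {a : Type} (l : List a) (x v : a) :
    (l ++ [x]).set l.length v = l ++ [v] := by
  induction l with
  | nil => rfl
  | cons c l ih => simp [ih]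

theorem pv_getD_set_ne {a : Type} [Inhabited a] (l : List a) (i j : Nat) (v d : a) (h : j ≠ i) :
    (l.set i v).getD j d = l.getD j d := by
  simp [List.getD_eq_getElem?_getD, List.getElem?_set_ne (Ne.symm h)]

theorem pv_getD_set_self {a : Type} (l : List a) (i : Nat) (v d : a) (h : i < l.length) :
    (l.set i v).getD i d = v := by
  simp [List.getD_eq_getElem?_getD, h]

theorem pv_getD_append_left {a : Type} (l l' : List a) (i : Nat) (d : a) (h : i < l.length) :
    (l ++ l').getD i d = l.getD i d := by
  simp [List.getD_eq_getElem?_getD, List.getElem?_append_left h]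

theorem pv_getD_concat_length {a : Type} (l : List a) (x d : a) :
    (l ++ [x]).getD l.length d = x := by
  simp [List.getD_eq_getElem?_getD]

-- the scan pvFirstFit over the sizes table finds exactly the group pvPlaceA appends to
theorem pvFF (d : PySem.Dict String (List String)) (m : Int) (L : String)
    (bad : PySem.Set Int) (gs : List (List String)) (i0 : Nat)
    (h : ∀ j : Nat, PySem.Set.contains bad (Int.ofNat (i0 + j)) = true ↔
          ∃ mm ∈ gs.getD j [], L ∈ (d.get? mm).getD []) :
    (pvFirstFit m bad (gs.map PySem.List.len) i0 = none ∧ pvPlaceA d m L gs = gs ++ [[L]]) ∨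
    (∃ j : Nat, pvFirstFit m bad (gs.map PySem.List.len) i0 = some (i0 + j) ∧ j < gs.length ∧
       pvPlaceA d m L gs = gs.set j (gs.getD j [] ++ [L])) := by
  induction gs generalizing i0 with
  | nil => exact Or.inl ⟨rfl, rfl⟩
  | cons g gs ih =>
      have h0 := h 0
      simp only [Nat.add_zero, List.getD_cons_zero] at h0
      have hkey : (¬ PySem.Set.contains bad (Int.ofNat i0) = true) ↔
          ∀ x ∈ g, L ∉ (d.get? x).getD [] := by
        rw [h0]; simp [not_exists]
      have hcond : (!(PySem.Set.contains bad (Int.ofNat i0)))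
          = (g.all fun other => !(((d.get? other).getD []).contains L)) := by
        rw [Bool.eq_iff_iff]
        simpa [List.all_eq_true, List.contains_iff_mem] using hkey
      cases hc : (decide (PySem.List.len g < m)
          && (g.all fun other => !(((d.get? other).getD []).contains L))) with
      | true =>
          refine Or.inr ⟨0, ?_, Nat.succ_pos _, ?_⟩
          · simp only [List.map_cons, pvFirstFit]
            rw [hcond, hc]
            simp
          · simp only [pvPlaceA]
            rw [hc]
            simp
      | false =>
          have h' : ∀ j : Nat, PySem.Set.contains bad (Int.ofNat ((i0 + 1) + j)) = true ↔
              ∃ mm ∈ gs.getD j [], L ∈ (d.get? mm).getD [] := by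
            intro j
            have hj := h (j + 1)
            have he : i0 + (j + 1) = (i0 + 1) + j := by omega
            simpa [he] using hj
          rcases ih (i0 + 1) h' with ⟨hn, hp⟩ | ⟨j, hs, hj, hp⟩
          · refine Or.inl ⟨?_, ?_⟩
            · simp only [List.map_cons, pvFirstFit]
              rw [hcond, hc]
              simp [hn]
            · simp only [pvPlaceA]
              rw [hc]
              simp [hp]
          · refine Or.inr ⟨j + 1, ?_, by simpa [List.length_cons] using Nat.succ_lt_succ hj, ?_⟩
            · simp only [List.map_cons, pvFirstFit]
              rw [hcond, hc]
              simp only [Bool.false_eq_true, reduceIte]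
              rw [hs]
              congr 1
              omega
            · simp only [pvPlaceA]
              rw [hc]
              simp [hp]

theorem pvStepB_eq (d : PySem.Dict String (List String)) (m : Int) (L : String)
    (gs : List (List String)) (ss : List Int) (b : PySem.Dict String (PySem.Set Int))
    (hss : ss = gs.map PySem.List.len) (hinv : pvInvB d b gs) :
    (pvStepB d m (gs, ss, b) L).1 = pvPlaceA d m L gs ∧
    (pvStepB d m (gs, ss, b) L).2.1 = (pvPlaceA d m L gs).map PySem.List.len ∧
    pvInvB d (pvStepB d m (gs, ss, b) L).2.2 (pvPlaceA d m L gs) := by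
  subst hss
  have h0 : ∀ j : Nat, PySem.Set.contains (b.getD L PySem.Set.empty) (Int.ofNat (0 + j)) = true ↔
      ∃ mm ∈ gs.getD j [], L ∈ (d.get? mm).getD [] := by
    intro j; simpa using hinv L j
  rcases pvFF d m L (b.getD L PySem.Set.empty) gs 0 h0 with ⟨hn, hp⟩ | ⟨j, hs, hj, hp⟩
  · -- no existing group fits: a fresh group is opened at index gs.length
    have hgroups : (pvStepB d m (gs, gs.map PySem.List.len, b) L).1 = gs ++ [[L]] := by
      simp only [pvStepB, hn]
      rw [pv_getD_concat_length]
      simp [pv_set_concat gs [] [L]]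
    have hsizes : (pvStepB d m (gs, gs.map PySem.List.len, b) L).2.1
        = (gs ++ [[L]]).map PySem.List.len := by
      simp only [pvStepB, hn]
      have e1 : gs.length = (List.map PySem.List.len gs).length := by simp
      rw [e1, pv_getD_concat_length, pv_set_concat]
      simp [PySem.List.len]
    have hb : (pvStepB d m (gs, gs.map PySem.List.len, b) L).2.2
        = pvBlockAll (Int.ofNat gs.length) ((d.get? L).getD []) b := by
      simp only [pvStepB, hn]
    refine ⟨by rw [hgroups, hp], by rw [hsizes, hp], ?_⟩
    rw [hb, hp]
    intro y i
    rw [pvBlockAll_mem, hinv y i]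
    rcases Nat.lt_trichotomy i gs.length with hi | hi | hi
    · rw [pv_getD_append_left _ _ _ _ hi]
      simp only [Int.ofNat_eq_natCast, Nat.cast_inj]
      simp
      intro _ h
      exact absurd h (by omega)
    · subst hi
      rw [pv_getD_concat_length, List.getD_eq_default gs ([]) (le_refl _)]
      simp
    · rw [List.getD_eq_default gs ([]) (by omega),
         List.getD_eq_default (gs ++ [[L]]) ([]) (by simp; omega)]
      simp only [Int.ofNat_eq_natCast, Nat.cast_inj]
      simp
      intro _
      omega
  · -- group j fits: letter appended there, index j pushed onto blocked[x] for x in conflicts[L]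
    simp only [Nat.zero_add] at hs
    have hgroups : (pvStepB d m (gs, gs.map PySem.List.len, b) L).1
        = gs.set j (gs.getD j [] ++ [L]) := by
      simp only [pvStepB, hs]
    have hsizes : (pvStepB d m (gs, gs.map PySem.List.len, b) L).2.1
        = (gs.set j (gs.getD j [] ++ [L])).map PySem.List.len := by
      simp only [pvStepB, hs]
      rw [List.map_set]
      have e1 : (List.map PySem.List.len gs).getD j 0 = PySem.List.len (gs.getD j []) := by
        rw [List.getD_eq_getElem _ _ (by simpa using hj), List.getD_eq_getElem _ _ hj]
        simp
      rw [e1]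
      simp [PySem.List.len]
    have hb : (pvStepB d m (gs, gs.map PySem.List.len, b) L).2.2
        = pvBlockAll (Int.ofNat j) ((d.get? L).getD []) b := by
      simp only [pvStepB, hs]
    refine ⟨by rw [hgroups, hp], by rw [hsizes, hp], ?_⟩
    rw [hb, hp]
    intro y i
    rw [pvBlockAll_mem, hinv y i]
    by_cases hij : i = j
    · subst hij
      rw [pv_getD_set_self _ _ _ _ hj]
      simp only [List.mem_append, List.mem_singleton, Int.ofNat_eq_natCast]
      constructor
      · rintro (⟨mm, hm1, hm2⟩ | ⟨hy, _⟩)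
        · exact ⟨mm, Or.inl hm1, hm2⟩
        · exact ⟨L, Or.inr rfl, hy⟩
      · rintro ⟨mm, hm1 | hm1, hm2⟩
        · exact Or.inl ⟨mm, hm1, hm2⟩
        · exact Or.inr ⟨hm1 ▸ hm2, trivial⟩
    · rw [pv_getD_set_ne _ _ _ _ _ hij]
      simp only [Int.ofNat_eq_natCast, Nat.cast_inj]
      simp
      intro _ h
      exact absurd h hij

theorem pvFoldB_eq (d : PySem.Dict String (List String)) (m : Int) (ls : List String)
    (gs : List (List String)) (ss : List Int) (b : PySem.Dict String (PySem.Set Int))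
    (hss : ss = gs.map PySem.List.len) (hinv : pvInvB d b gs) :
    (ls.foldl (fun st L => pvStepB d m st L) (gs, ss, b)).1 =
      ls.foldl (fun groups L => pvPlaceA d m L groups) gs := by
  induction ls generalizing gs ss b with
  | nil => rfl
  | cons L ls ih =>
      obtain ⟨h1, h2, h3⟩ := pvStepB_eq d m L gs ss b hss hinv
      simp only [List.foldl_cons]
      have : pvStepB d m (gs, ss, b) L
          = ((pvPlaceA d m L gs), (pvPlaceA d m L gs).map PySem.List.len,
             (pvStepB d m (gs, ss, b) L).2.2) := by
        refine Prod.ext h1 (Prod.ext h2 rfl)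
      rw [this]
      exact ih _ _ _ rfl (this ▸ h3)

-- ===== VERDICT (by name: the statement is the Claim_ definition above) =====
theorem greedy_group_letters_spec : Claim_equal_greedy_group_letters := by
  intro letters conflicts max_group_size _ _
  unfold Spec_greedy_group_letters greedy_group_letters greedy_group_letters_alt
  refine (pvFoldB_eq _ _ _ [] [] PySem.Dict.empty rfl ?_).symm
  intro y i
  simp [PySem.Dict.getD_empty, PySem.Set.empty]
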